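-- pv_equiv track=rewrite | github.com/ouziel-slama/myhashisnice | niceparser/src/server.py | bold_zero
-- ===== SOURCE A (Python) =====
-- def bold_zero(value):
--     if not value.startswith("0"):
--         return value
--     bold_value = f"<b>"
--     closed = False
--     for char in value:
--         if char != "0" and not closed:
--             bold_value += f"</b>{char}"
--             closed = True
--         else:
--             bold_value += f"{char}"
--     return bold_value
-- ===== SOURCE B (Python) =====
-- def bold_zero(value):
--     stripped = value.lstrip("0")
--     if len(stripped) == len(value):
--         return value
--     zeros = value[:len(value) - len(stripped)]
--     return "<b>" + zeros + "</b>" + stripped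
-- ===== Notes on version B (the rewrite author's own statement) =====
-- stated objective: simpler
-- what changed: Replaces the char-by-char loop with a 'closed' boolean flag by a single split of the string into its leading-zero prefix (via lstrip) and the rest, always emitting a closing tag.
-- intended difference: On nonempty all-zero strings A returns '<b>'+value with no closing </b> tag (invalid HTML, leftover of the loop's 'closed' flag never firing); B returns '<b>'+value+'</b>', the well-formed markup a maintainer would intend. — e.g. on bold_zero("00"): A returns "<b>00", B returns "<b>00</b>"
import Mathlib
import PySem

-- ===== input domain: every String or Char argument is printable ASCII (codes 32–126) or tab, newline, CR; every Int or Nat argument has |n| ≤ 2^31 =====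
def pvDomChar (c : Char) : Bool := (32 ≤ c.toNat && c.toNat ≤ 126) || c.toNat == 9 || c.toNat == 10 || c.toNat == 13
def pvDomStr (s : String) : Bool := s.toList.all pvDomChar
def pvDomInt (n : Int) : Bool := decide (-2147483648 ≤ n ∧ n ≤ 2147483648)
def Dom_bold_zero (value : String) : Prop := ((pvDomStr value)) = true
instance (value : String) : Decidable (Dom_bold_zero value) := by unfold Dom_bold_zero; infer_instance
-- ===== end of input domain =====

-- B replaces A's flagged char-by-char loop by one split on the leading-zero prefix (simpler); on
-- all-zero strings A leaves the <b> tag unclosed and B closes it (the intended difference D_ below).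

-- ===== PORT A =====
-- the loop body of A, one step per character: state = (accumulated chars, closed flag)
def boldZeroStep (st : List Char × Bool) (c : Char) : List Char × Bool :=
  if c ≠ '0' ∧ st.2 = false then (st.1 ++ ['<', '/', 'b', '>', c], true)
  else (st.1 ++ [c], st.2)

def bold_zero (value : String) : String :=
  if ¬ (PySem.Str.startswith value "0") then value
  else
    String.ofList (value.toList.foldl boldZeroStep (['<', 'b', '>'], false)).1

-- ===== PORT B =====
-- stripped = value.lstrip("0") is dropWhile (· == '0') on the chars (exact);
-- value[:len(value)-len(stripped)] is take of that bound, exact since it lies in [0, len].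
def bold_zero_alt (value : String) : String :=
  if (value.toList.dropWhile (fun c => c == '0')).length = value.toList.length then value
  else
    String.ofList (['<', 'b', '>'] ++
      value.toList.take (value.toList.length - (value.toList.dropWhile (fun c => c == '0')).length) ++
      ['<', '/', 'b', '>'] ++ value.toList.dropWhile (fun c => c == '0'))

-- ===== PRECONDITION & SPEC =====
-- On nonempty all-zero strings A returns "<b>"+value with no closing </b> tag (invalid HTML,
-- leftover of the 'closed' flag never firing); B returns "<b>"+value+"</b>", the intended markup.
def D_bold_zero (value : String) : Prop :=
  value ≠ "" ∧ value.toList.all (fun c => c == '0') = true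
instance (value : String) : Decidable (D_bold_zero value) := by unfold D_bold_zero; infer_instance

def Spec_bold_zero (value : String) (out : String) : Prop :=
  ¬ D_bold_zero value → out = bold_zero_alt value
instance (value : String) (out : String) : Decidable (Spec_bold_zero value out) := by
  unfold Spec_bold_zero; infer_instance

def pvDiffWitness_bold_zero : String := "00"
def pvDiffWitnessOut_bold_zero : String × String := ("<b>00", "<b>00</b>")

-- ===== CLAIM (what is proved, stated in full; the proofs are below) =====
def Claim_unchanged_bold_zero : Prop :=
  ∀ (value : String), Dom_bold_zero value → Spec_bold_zero value (bold_zero value)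
def Claim_changed_bold_zero : Prop :=
  Dom_bold_zero (pvDiffWitness_bold_zero) ∧ D_bold_zero (pvDiffWitness_bold_zero) ∧
  bold_zero (pvDiffWitness_bold_zero) = pvDiffWitnessOut_bold_zero.1 ∧
  bold_zero_alt (pvDiffWitness_bold_zero) = pvDiffWitnessOut_bold_zero.2 ∧
  pvDiffWitnessOut_bold_zero.1 ≠ pvDiffWitnessOut_bold_zero.2
def Claim_exact_bold_zero : Prop :=
  ∀ (value : String), Dom_bold_zero value → D_bold_zero value →
    bold_zero value ≠ bold_zero_alt value

-- ===== LEMMAS AND PROOFS =====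

-- once the tag is closed, A's loop just copies the remaining characters
theorem boldZero_loop_closed (l acc : List Char) :
    l.foldl boldZeroStep (acc, true) = (acc ++ l, true) := by
  induction l generalizing acc with
  | nil => simp
  | cons c t ih => simp [boldZeroStep, ih]

-- A's loop from the open state: copies the leading zeros, then (if any non-'0' follows)
-- inserts the closing tag before the first non-'0' and copies the rest
theorem boldZero_loop_open (l acc : List Char) :
    l.foldl boldZeroStep (acc, false) =
      match l.dropWhile (fun c => c == '0') with
      | [] => (acc ++ l, false)
      | c :: rest =>
          (acc ++ l.takeWhile (fun c => c == '0') ++ ['<', '/', 'b', '>'] ++ c :: rest, true) := by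
  induction l generalizing acc with
  | nil => simp
  | cons c t ih =>
    by_cases hc : c = '0'
    · subst hc
      have hstep : boldZeroStep (acc, false) '0' = (acc ++ ['0'], false) := by
        simp [boldZeroStep]
      simp only [List.foldl_cons, hstep, ih, List.dropWhile_cons, List.takeWhile_cons]
      cases h : t.dropWhile (fun c => c == '0') <;> simp
    · have hstep : boldZeroStep (acc, false) c = (acc ++ ['<', '/', 'b', '>', c], true) := by
        simp [boldZeroStep, hc]
      simp only [List.foldl_cons, hstep, boldZero_loop_closed, List.dropWhile_cons,
        List.takeWhile_cons]
      simp [hc]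

-- B's take of (length − length of the stripped suffix) is exactly the zero prefix
theorem takeWhile_eq_take_sub (l : List Char) :
    l.take (l.length - (l.dropWhile (fun c => c == '0')).length) =
      l.takeWhile (fun c => c == '0') := by
  have h : l.takeWhile (fun c => c == '0') ++ l.dropWhile (fun c => c == '0') = l :=
    List.takeWhile_append_dropWhile
  have hlen : (l.takeWhile (fun c => c == '0')).length =
      l.length - (l.dropWhile (fun c => c == '0')).length := by
    have hl := congrArg List.length h
    simp only [List.length_append] at hl
    omega
  have := List.take_left' (l₂ := l.dropWhile (fun c => c == '0')) hlen
  rw [h] at this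
  exact this

-- ===== VERDICT (by name: the statement is the Claim_ definition above) =====
theorem bold_zero_spec : Claim_unchanged_bold_zero := by
  intro value _ hD
  by_cases hs : PySem.Str.startswith value "0" = true
  · -- value starts with '0'
    have hpre : ['0'] <+: value.toList := by
      have hsw := (PySem.Chars.startswith_iff (s := value.toList) (p := "0".toList)).mp
        (by simpa using hs)
      simpa using hsw
    obtain ⟨t, ht⟩ := hpre
    have hne : value.toList ≠ [] := by rw [← ht]; simp
    have hD' : ¬ value.toList.all (fun c => c == '0') = true := by
      intro hall
      exact hD ⟨by intro h; rw [h] at hne; simp at hne, hall⟩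
    have hdrop : value.toList.dropWhile (fun c => c == '0') ≠ [] := by
      intro h
      exact hD' (List.all_eq_true.mpr (fun c hc => List.dropWhile_eq_nil_iff.mp h c hc))
    have hlen : (value.toList.dropWhile (fun c => c == '0')).length ≠ value.toList.length := by
      rw [← ht]
      have h2 : (t.dropWhile (fun c => c == '0')).length ≤ t.length := List.length_dropWhile_le _ _
      simp only [List.cons_append, List.nil_append, List.dropWhile_cons, List.length_cons]
      simp only [show ('0' == '0') = true from rfl, if_true]
      omega
    cases h : value.toList.dropWhile (fun c => c == '0') with
    | nil => exact absurd h hdrop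
    | cons c rest =>
      have hlen2 : ¬ ((c :: rest) : List Char).length = value.toList.length := by
        rw [← h]; exact hlen
      have hA : bold_zero value = String.ofList
          ('<' :: 'b' :: '>' ::
            (value.toList.takeWhile (fun c => c == '0') ++ '<' :: '/' :: 'b' :: '>' :: c :: rest)) := by
        unfold bold_zero
        rw [if_neg (not_not_intro hs), boldZero_loop_open, h]
        simp
      have hB : bold_zero_alt value = String.ofList
          ('<' :: 'b' :: '>' ::
            (value.toList.takeWhile (fun c => c == '0') ++ '<' :: '/' :: 'b' :: '>' :: c :: rest)) := by
        have ht2 := takeWhile_eq_take_sub value.toList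
        unfold bold_zero_alt
        rw [h] at ht2 ⊢
        rw [if_neg hlen2, ht2]
        simp
      rw [hA, hB]
  · -- value does not start with '0': both sides return value unchanged
    have hdrop : value.toList.dropWhile (fun c => c == '0') = value.toList := by
      cases hl : value.toList with
      | nil => simp
      | cons c t =>
        have hc : ¬ c = '0' := by
          intro hc
          apply hs
          simp only [PySem.Str.startswith_eq]
          rw [PySem.Chars.startswith_iff, hl, hc]
          exact ⟨t, by simp⟩
        simp [hc]
    unfold bold_zero bold_zero_alt
    rw [if_pos (by simpa using hs), if_pos (by rw [hdrop])]

theorem bold_zero_changed : Claim_changed_bold_zero := by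
  unfold Claim_changed_bold_zero; decide

theorem bold_zero_tight : Claim_exact_bold_zero := by
  intro value _ hD h
  obtain ⟨hne, hall⟩ := hD
  have hne' : value.toList ≠ [] := by
    intro hnil
    exact hne (by simpa using congrArg String.ofList hnil)
  have hpos : value.toList.length ≠ 0 := by
    intro h0
    exact hne' (List.length_eq_zero_iff.mp h0)
  have hdrop : value.toList.dropWhile (fun c => c == '0') = [] := by
    apply List.dropWhile_eq_nil_iff.mpr
    intro c hc
    exact List.all_eq_true.mp hall c hc
  have hs : PySem.Str.startswith value "0" = true := by
    simp only [PySem.Str.startswith_eq]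
    rw [PySem.Chars.startswith_iff]
    cases hl : value.toList with
    | nil => exact absurd hl hne'
    | cons c t =>
      have hc : c = '0' := by
        have := List.all_eq_true.mp hall c (by rw [hl]; exact List.mem_cons_self)
        simpa using this
      rw [hc]
      exact ⟨t, by simp⟩
  have hA : bold_zero value = String.ofList (['<', 'b', '>'] ++ value.toList) := by
    unfold bold_zero
    rw [if_neg (not_not_intro hs), boldZero_loop_open, hdrop]
  have hB : bold_zero_alt value =
      String.ofList (['<', 'b', '>'] ++ value.toList ++ ['<', '/', 'b', '>']) := by
    unfold bold_zero_alt
    rw [if_neg (by rw [hdrop]; simpa using fun h0 => hpos h0.symm), hdrop]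
    simp only [List.length_nil, Nat.sub_zero, List.take_length, List.append_nil]
  rw [hA, hB] at h
  have hlen2 := congrArg (fun s => s.toList.length) h
  simp only [String.toList_ofList, List.length_append, List.length_cons,
    List.length_nil] at hlen2
  omega
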